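-- pv_equiv track=rewrite | github.com/Robin-Amann/bachelor-thesis | old_code/transcript_alignment/postprocessing.py | process
-- ===== SOURCE A (Python) =====
-- def process(snips, trimmed) :
--     trimmed = trimmed.split()
--     trimmed_snips = []
--     base = 0
--     for s in snips :
--         trimmed_snips.append( " ".join(trimmed[base : base + len(s.split())]) )
--         base += len(s.split())
--     return trimmed_snips
-- ===== SOURCE B (Python) =====
-- def process(snips, trimmed):
--     words = trimmed.split()
--     labels = [i for i, s in enumerate(snips) for _ in s.split()]
--     tagged = list(zip(labels, words))
--     return [" ".join(w for l, w in tagged if l == i) for i in range(len(snips))]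
-- ===== Notes on version B (the rewrite author's own statement) =====
-- stated objective: alternative
-- what changed: B tags every word of trimmed with the index of the snip it belongs to (by expanding enumerate(snips) into a label per word and zipping with the words) and then collects each snip's words by filtering on that tag, instead of slicing the word list with a running base offset.
import Mathlib
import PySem

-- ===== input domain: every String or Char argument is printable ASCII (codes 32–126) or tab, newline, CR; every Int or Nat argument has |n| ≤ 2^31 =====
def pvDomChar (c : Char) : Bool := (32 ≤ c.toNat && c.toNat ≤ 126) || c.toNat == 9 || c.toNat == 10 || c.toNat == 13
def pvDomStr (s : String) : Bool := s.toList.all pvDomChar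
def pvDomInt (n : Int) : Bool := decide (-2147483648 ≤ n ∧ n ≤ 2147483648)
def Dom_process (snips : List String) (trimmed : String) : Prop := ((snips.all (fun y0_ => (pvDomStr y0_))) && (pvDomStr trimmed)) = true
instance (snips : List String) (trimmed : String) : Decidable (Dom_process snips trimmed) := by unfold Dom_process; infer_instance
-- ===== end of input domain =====

-- B replaces A's running-offset slicing loop by a tag-and-collect algorithm: each word is
-- labelled with its snip index and each output is gathered by filtering on the label
-- (alternative algorithm, not claimed faster).

-- ===== PORT A =====
def process (snips : List String) (trimmed : String) : List String :=
  let tr := PySem.Str.split₀ trimmed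
  (snips.foldl
    (fun (st : List String × Int) s =>
      (st.1 ++ [PySem.Str.join " " (PySem.List.slice tr (some st.2)
                  (some (st.2 + ((PySem.Str.split₀ s).length : Int))))],
       st.2 + ((PySem.Str.split₀ s).length : Int)))
    ([], 0)).1

-- ===== PORT B =====
def process_alt (snips : List String) (trimmed : String) : List String :=
  let words := PySem.Str.split₀ trimmed
  let labels := (PySem.List.enumerate snips 0).flatMap
                  (fun p => List.replicate (PySem.Str.split₀ p.2).length p.1)
  let tagged := labels.zip words
  (PySem.List.pyRange 0 (snips.length : Int) 1).map
    (fun i => PySem.Str.join " " ((tagged.filter (fun p => p.1 == i)).map Prod.snd))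

-- ===== PRECONDITION & SPEC =====
def Spec_process (snips : List String) (trimmed : String) (out : List String) : Prop := out = process_alt snips trimmed
instance (snips : List String) (trimmed : String) (out : List String) : Decidable (Spec_process snips trimmed out) := by unfold Spec_process; infer_instance

-- ===== CLAIM (what is proved, stated in full; the proofs are below) =====
def Claim_equal_process : Prop := ∀ (snips : List String) (trimmed : String), Dom_process snips trimmed → Spec_process snips trimmed (process snips trimmed)

-- ===== LEMMAS AND PROOFS =====

-- common recursive specification both ports are reduced to
def segSpec : List String → List String → List String
  | [], _ => []
  | s :: rest, ws =>
      PySem.Str.join " " (ws.take (PySem.Str.split₀ s).length)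
        :: segSpec rest (ws.drop (PySem.Str.split₀ s).length)

lemma zip_append_left {α β : Type} (a b : List α) (ws : List β) :
    (a ++ b).zip ws = a.zip ws ++ b.zip (ws.drop a.length) := by
  induction a generalizing ws with
  | nil => simp
  | cons x xs ih =>
    cases ws with
    | nil => simp
    | cons w ws' => simp [ih]

lemma map_snd_zip_replicate {α β : Type} (k : Nat) (j : α) (ws : List β) :
    (((List.replicate k j).zip ws).map Prod.snd) = ws.take k := by
  induction k generalizing ws with
  | zero => simp
  | succ n ih =>
    cases ws with
    | nil => simp
    | cons w ws' => simp [List.replicate_succ, ih]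

lemma fst_mem_zip_replicate {α β : Type} {k : Nat} {j : α} {ws : List β}
    {p : α × β} (hp : p ∈ (List.replicate k j).zip ws) : p.1 = j :=
  List.eq_of_mem_replicate (List.of_mem_zip hp).1

lemma filter_zip_replicate_self (k : Nat) (j : Int) (ws : List String) :
    ((List.replicate k j).zip ws).filter (fun p => p.1 == j)
      = (List.replicate k j).zip ws := by
  apply List.filter_eq_self.mpr
  intro p hp
  simp [fst_mem_zip_replicate hp]

lemma filter_zip_replicate_ne (k : Nat) (j m : Int) (h : j ≠ m) (ws : List String) :
    ((List.replicate k j).zip ws).filter (fun p => p.1 == m) = [] := by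
  apply List.filter_eq_nil_iff.mpr
  intro p hp
  simp [fst_mem_zip_replicate hp, h]

lemma mem_labels_ge {snips : List String} {j l : Int}
    (hl : l ∈ (PySem.List.enumerate snips j).flatMap
            (fun p => List.replicate (PySem.Str.split₀ p.2).length p.1)) : j ≤ l := by
  rcases List.mem_flatMap.mp hl with ⟨pr, hpr, hmem⟩
  rcases (PySem.List.mem_enumerate_iff _ _ _).mp hpr with ⟨k, hk, hpr'⟩
  have := List.eq_of_mem_replicate hmem
  subst hpr'
  simp at this
  omega

lemma filter_zip_labels_lt (snips : List String) (m j : Int) (h : j < m) (ws : List String) :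
    (((PySem.List.enumerate snips m).flatMap
        (fun p => List.replicate (PySem.Str.split₀ p.2).length p.1)).zip ws).filter
      (fun p => p.1 == j) = [] := by
  apply List.filter_eq_nil_iff.mpr
  intro p hp
  have h1 : m ≤ p.1 := mem_labels_ge (List.of_mem_zip hp).1
  simp
  omega

-- B's filtering pass computes segSpec (generalised over the enumerate start j)
lemma B_loop (snips : List String) (ws : List String) (j : Int) :
    (List.range snips.length).map
      (fun (k : Nat) => PySem.Str.join " "
        (((((PySem.List.enumerate snips j).flatMap
              (fun p => List.replicate (PySem.Str.split₀ p.2).length p.1)).zip ws).filter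
            (fun p => p.1 == j + (k : Int))).map Prod.snd))
      = segSpec snips ws := by
  induction snips generalizing ws j with
  | nil => simp [segSpec]
  | cons s rest ih =>
    simp only [List.length_cons]
    rw [List.range_succ_eq_map, List.map_cons, List.map_map]
    rw [PySem.List.enumerate_cons]
    simp only [List.flatMap_cons, zip_append_left, List.length_replicate, List.filter_append,
      List.map_append]
    simp only [segSpec]
    refine List.cons_eq_cons.mpr ⟨?_, ?_⟩
    · -- head: label j collects exactly the first count words
      rw [filter_zip_labels_lt rest (j + 1) (j + (0:Nat)) (by omega)]
      simp [filter_zip_replicate_self, map_snd_zip_replicate]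
    · -- tail: labels j+1+i, first block contributes nothing
      have := ih (ws.drop (PySem.Str.split₀ s).length) (j + 1)
      rw [← this]
      apply List.map_congr_left
      intro i _
      simp only [Function.comp_apply, Nat.succ_eq_add_one]
      rw [filter_zip_replicate_ne _ j (j + ((i + 1 : Nat) : Int)) (by push_cast; omega)]
      push_cast
      have harith : j + ((i : Int) + 1) = (j + 1) + (i : Int) := by ring
      rw [harith]
      simp

-- A's running-offset loop computes segSpec (generalised over base b and accumulator)
lemma A_loop (tr : List String) (snips : List String) (b : Nat) (acc : List String) :
    (snips.foldl
      (fun (st : List String × Int) s =>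
        (st.1 ++ [PySem.Str.join " " (PySem.List.slice tr (some st.2)
                    (some (st.2 + ((PySem.Str.split₀ s).length : Int))))],
         st.2 + ((PySem.Str.split₀ s).length : Int)))
      (acc, (b : Int))).1
    = acc ++ segSpec snips (tr.drop b) := by
  induction snips generalizing b acc with
  | nil => simp [segSpec]
  | cons s rest ih =>
    have hcast : (b : Int) + ((PySem.Str.split₀ s).length : Int)
        = ((b + (PySem.Str.split₀ s).length : Nat) : Int) := by push_cast; ring
    simp only [List.foldl_cons]
    rw [PySem.List.slice_natCast_add, hcast, ih]
    simp [segSpec, List.drop_drop, List.append_assoc]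

-- ===== VERDICT (by name: the statement is the Claim_ definition above) =====
theorem process_spec : Claim_equal_process := by
  intro snips trimmed _
  unfold Spec_process process process_alt
  rw [PySem.List.pyRange_one]
  simp only [Int.sub_zero, Int.toNat_natCast, List.map_map]
  have hA := A_loop (PySem.Str.split₀ trimmed) snips 0 []
  have hB := B_loop snips (PySem.Str.split₀ trimmed) 0
  simp only [List.drop_zero, List.nil_append, Nat.cast_zero] at hA
  rw [hA]
  simpa [Function.comp_def] using hB.symm
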